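-- pv_equiv track=rewrite | github.com/erdemduman/Homework | CSE_321_Algorithm_Design/HW3/labify_151044005.py | findMinimumCostToLabifyGTU
-- ===== SOURCE A (Python) =====
-- def findMinimumCostToLabifyGTU(x,y, graph):
--
--     unique = []
--     road_number = 0
--
--     if x <= y:
--         cost = x*len(graph)
--     else:
--         unique, connectedGraphs = howManyConnected(graph)
--         for i in unique:
--             road_number += len(i)-1
--
--         cost = (connectedGraphs*x) + (road_number*y)
--
--
--     return cost
--
-- def howManyConnected(graph):
--
--     roads = []
--     unique = []
--
--     for k,v in graph.items():
--         roads.append(set(breadth_first_search(k,graph)))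
--
--     value = check_unique_number(roads, unique)
--
--     return unique, value
--
-- def check_unique_number(road_list, temp):
--
--     for i in road_list:
--         if i not in temp:
--             temp.append(i)
--
--     return len(temp)
--
-- def breadth_first_search(start, graph):
--
--     isVisited = {}
--
--     for k,v in graph.items():
--         isVisited[k] = False
--
--     queue = []
--     order = []
--
--     isVisited[start] = True
--     queue.append(start)
--
--     while(len(queue) != 0):
--         start = queue.pop(0)
--         order.append(start)
--
--         adj = list(graph[start])
--
--         for i in adj:
--             next = i
--             if (isVisited[next] != True):
--                 isVisited[next] = True
--                 queue.append(next)
--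
--     return order
-- ===== SOURCE B (Python) =====
-- def findMinimumCostToLabifyGTU(x, y, graph):
--     # Iterated relational composition (bounded-depth dynamic programming) instead of
--     # per-node graph traversal: n synchronous rounds compute every node's reachability
--     # set at once; components deduplicate as sorted tuples.
--     if x <= y:
--         return x * len(graph)
--     reach = {k: {k} for k in graph}
--     for _ in range(len(graph)):
--         reach = {k: {k}.union(*(reach[w] for w in graph[k])) for k in graph}
--     comps = {tuple(sorted(r)) for r in reach.values()}
--     count = len(comps)
--     total = sum(len(c) for c in comps)
--     return count * x + (total - count) * y
-- ===== Notes on version B (the rewrite author's own statement) =====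
-- stated objective: alternative
-- what changed: A's per-start BFS traversal (queue, visited dict) plus pairwise set-comparison dedup is replaced by a traversal-free dynamic program: n synchronous rounds of relational composition (reach_{i+1}[k] = {k} U union of reach_i over k's neighbours) compute all reachability sets simultaneously, then components are deduplicated as canonical sorted tuples in a hash set and the cost is computed arithmetically from their count and total size.
import Mathlib
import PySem

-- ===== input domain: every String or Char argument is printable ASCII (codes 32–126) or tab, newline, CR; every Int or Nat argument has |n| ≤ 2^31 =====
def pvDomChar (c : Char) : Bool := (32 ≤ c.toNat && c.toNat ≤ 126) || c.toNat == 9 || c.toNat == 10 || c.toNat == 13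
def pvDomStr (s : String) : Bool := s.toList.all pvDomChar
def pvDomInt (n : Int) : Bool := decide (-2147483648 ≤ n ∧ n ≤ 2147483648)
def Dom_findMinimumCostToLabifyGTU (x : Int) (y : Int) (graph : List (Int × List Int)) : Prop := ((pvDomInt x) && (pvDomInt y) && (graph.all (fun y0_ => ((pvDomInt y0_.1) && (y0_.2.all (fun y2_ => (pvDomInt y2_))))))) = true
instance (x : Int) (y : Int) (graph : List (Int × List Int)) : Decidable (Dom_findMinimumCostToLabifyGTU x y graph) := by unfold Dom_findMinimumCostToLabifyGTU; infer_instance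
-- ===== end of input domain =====

-- B replaces A's per-start BFS traversal + pairwise set-comparison dedup by a traversal-free
-- dynamic program: n synchronous rounds of relational composition compute all reachability
-- sets at once; components are deduplicated as canonical sorted tuples (alternative algorithm).


-- shared encoding of the Python dict argument (both ports receive the same dict)
def pvDict (graph : List (Int × List Int)) : PySem.Dict Int (List Int) := PySem.Dict.ofList graph
def pvAdj (graph : List (Int × List Int)) (u : Int) : List Int := (pvDict graph).getD u []
-- all node names occurring anywhere in the dict (used only as A's termination measure)
def pvAllNodes (graph : List (Int × List Int)) : List Int :=
  PySem.Set.ofList ((pvDict graph).keys ++ ((pvDict graph).values).flatten)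

-- termination helper: marking one still-unmarked listed node decreases the unmarked count
theorem pvCountFlip (l : List Int) (hnd : l.Nodup) (i : Int) (hi : i ∈ l) (f g : Int → Bool)
    (hg : ∀ v, (g v = true ↔ (v = i ∨ f v = true))) (hfi : f i = false) :
    l.countP (fun v => !(g v)) + 1 = l.countP (fun v => !(f v)) := by
  induction l with
  | nil => cases hi
  | cons a t ih =>
    rcases List.nodup_cons.mp hnd with ⟨ha, ht⟩
    simp only [List.countP_cons]
    rcases List.mem_cons.mp hi with rfl | hit
    · have hga : g i = true := (hg i).mpr (Or.inl rfl)
      have htail : t.countP (fun v => !(g v)) = t.countP (fun v => !(f v)) := by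
        apply List.countP_congr
        intro v hv
        have hvi : v ≠ i := fun h => ha (h ▸ hv)
        have := hg v
        cases hG : g v <;> cases hF : f v <;> simp_all
      simp [hga, hfi, htail]
    · have hai : a ≠ i := fun h => ha (h ▸ hit)
      have hfg : g a = f a := by
        have := hg a
        cases hG : g a <;> cases hF : f a <;> simp_all
      have := ih ht hit
      cases hF : f a <;> simp [hfg, hF] <;> omega

theorem pvAdjSubset (graph : List (Int × List Int)) (u w : Int) (hw : w ∈ pvAdj graph u) :
    w ∈ pvAllNodes graph := by
  unfold pvAdj at hw
  rw [PySem.Dict.getD_eq_get?_getD] at hw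
  cases hg : (pvDict graph).get? u with
  | none => rw [hg] at hw; cases hw
  | some l =>
    rw [hg] at hw
    simp only [Option.getD_some] at hw
    have hit : (u, l) ∈ (pvDict graph).items := PySem.Dict.mem_items_of_get?_eq_some _ hg
    have hval : l ∈ (pvDict graph).values := by
      simp only [PySem.Dict.values]
      exact List.mem_map.mpr ⟨(u, l), hit, rfl⟩
    unfold pvAllNodes
    rw [PySem.Set.mem_ofList]
    exact List.mem_append.mpr (Or.inr (List.mem_flatten.mpr ⟨l, hval, hw⟩))

-- ===== PORT A =====
-- port of the body of the inner 'for i in adj' loop of breadth_first_search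
def pvBfsStep (s : PySem.Dict Int Bool × List Int) (i : Int) : PySem.Dict Int Bool × List Int :=
  if s.1.getD i false ≠ true then (s.1.insert i true, s.2 ++ [i]) else s
  -- isVisited[next] is a KeyError when next is not a key; Pre_ excludes that, getD false is exact there

theorem pvBfsInner_sum (graph : List (Int × List Int)) (adj : List Int)
    (hsub : ∀ i ∈ adj, i ∈ pvAllNodes graph) : ∀ (iv : PySem.Dict Int Bool) (q : List Int),
    (pvAllNodes graph).countP (fun v => !((adj.foldl pvBfsStep (iv, q)).1.getD v false))
        + (adj.foldl pvBfsStep (iv, q)).2.length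
      = (pvAllNodes graph).countP (fun v => !(iv.getD v false)) + q.length := by
  induction adj with
  | nil => intro iv q; rfl
  | cons i t ih =>
    intro iv q
    have hi : i ∈ pvAllNodes graph := hsub i (List.mem_cons_self ..)
    have hsub' : ∀ j ∈ t, j ∈ pvAllNodes graph := fun j hj => hsub j (List.mem_cons_of_mem _ hj)
    simp only [List.foldl_cons]
    by_cases h : iv.getD i false = true
    · have hstep : pvBfsStep (iv, q) i = (iv, q) := by simp [pvBfsStep, h]
      rw [hstep]
      exact ih hsub' iv q
    · have hstep : pvBfsStep (iv, q) i = (iv.insert i true, q ++ [i]) := by simp [pvBfsStep, h]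
      rw [hstep, ih hsub' (iv.insert i true) (q ++ [i])]
      have hflip := pvCountFlip (pvAllNodes graph) (PySem.Set.nodup_ofList _) i hi
        (fun v => iv.getD v false) (fun v => (iv.insert i true).getD v false)
        (by
          intro v
          show (iv.insert i true).getD v false = true ↔ v = i ∨ iv.getD v false = true
          rw [PySem.Dict.getD_insert]
          by_cases hv : v = i <;> simp [hv])
        (by cases hF : iv.getD i false <;> simp_all)
      simp only [] at hflip
      simp only [List.length_append, List.length_cons, List.length_nil]
      omega

-- port of the 'while(len(queue) != 0)' loop of breadth_first_search
def pvBfsLoop (graph : List (Int × List Int)) (isVisited : PySem.Dict Int Bool)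
    (queue order : List Int) : List Int :=
  match queue with
  | [] => order
  | start :: rest =>
    pvBfsLoop graph ((pvAdj graph start).foldl pvBfsStep (isVisited, rest)).1
      ((pvAdj graph start).foldl pvBfsStep (isVisited, rest)).2 (order ++ [start])
termination_by (pvAllNodes graph).countP (fun v => !(isVisited.getD v false)) + queue.length
decreasing_by
  have h := pvBfsInner_sum graph (pvAdj graph start) (fun i hi => pvAdjSubset graph start i hi)
    isVisited rest
  simp only [List.length_cons]
  omega

def breadthFirstSearch (start : Int) (graph : List (Int × List Int)) : List Int :=
  let isVisited := (pvDict graph).items.foldl (fun d p => d.insert p.1 false) PySem.Dict.empty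
  pvBfsLoop graph (isVisited.insert start true) [start] []

-- port of check_unique_number's loop (Python mutates temp; its final contents are returned here)
def pvCheckUnique (road_list temp : List (PySem.Set Int)) : List (PySem.Set Int) :=
  road_list.foldl (fun tm i => if tm.any (fun t => PySem.Set.equal t i) then tm else tm ++ [i]) temp

def howManyConnected (graph : List (Int × List Int)) : List (PySem.Set Int) × Int :=
  let roads := (pvDict graph).items.foldl
    (fun acc p => acc ++ [PySem.Set.ofList (breadthFirstSearch p.1 graph)]) []
  let unique := pvCheckUnique roads []
  (unique, (unique.length : Int))

def findMinimumCostToLabifyGTU (x : Int) (y : Int) (graph : List (Int × List Int)) : Int :=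
  if x ≤ y then x * ((pvDict graph).size : Int)
  else
    let u := howManyConnected graph
    let road_number := u.1.foldl (fun acc i => acc + (PySem.Set.len i - 1)) 0
    u.2 * x + road_number * y

-- ===== PORT B =====
-- reach = {k: {k} for k in graph}
def pvReachInit (graph : List (Int × List Int)) : PySem.Dict Int (PySem.Set Int) :=
  (pvDict graph).keys.foldl (fun d k => d.insert k (PySem.Set.ofList [k])) PySem.Dict.empty

-- reach = {k: {k}.union(*(reach[w] for w in graph[k])) for k in graph}
-- reach[w] is a KeyError when w is not a key; Pre_ excludes that, getD empty is exact there
def pvReachStep (graph : List (Int × List Int)) (R : PySem.Dict Int (PySem.Set Int)) :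
    PySem.Dict Int (PySem.Set Int) :=
  (pvDict graph).keys.foldl
    (fun d k => d.insert k
      ((pvAdj graph k).foldl (fun s w => PySem.Set.update s (R.getD w PySem.Set.empty))
        (PySem.Set.ofList [k])))
    PySem.Dict.empty

-- for _ in range(len(graph)): reach = …
def pvReachIter (graph : List (Int × List Int)) : Nat → PySem.Dict Int (PySem.Set Int)
  | 0 => pvReachInit graph
  | Nat.succ n => pvReachStep graph (pvReachIter graph n)

def findMinimumCostToLabifyGTU_alt (x : Int) (y : Int) (graph : List (Int × List Int)) : Int :=
  if x ≤ y then x * ((pvDict graph).size : Int)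
  else
    let R := pvReachIter graph (pvDict graph).size
    let comps : PySem.Set (List Int) := R.values.foldl
      (fun c r => PySem.Set.add c (PySem.List.sorted r (fun v => v) false)) PySem.Set.empty
    let count : Int := (comps.length : Int)
    let total : Int := (comps.map (fun c => (c.length : Int))).sum
    count * x + (total - count) * y

-- ===== PRECONDITION & SPEC =====
-- Pre_ excludes exactly the inputs where Python raises KeyError: when x > y both A and B
-- look up every adjacency entry as a dict key, so any entry naming a missing key raises.
def Pre_findMinimumCostToLabifyGTU (x : Int) (y : Int) (graph : List (Int × List Int)) : Prop :=
  x ≤ y ∨ ∀ p ∈ (PySem.Dict.ofList graph).items, ∀ w ∈ p.2, w ∈ (PySem.Dict.ofList graph).keys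
instance (x : Int) (y : Int) (graph : List (Int × List Int)) : Decidable (Pre_findMinimumCostToLabifyGTU x y graph) := by unfold Pre_findMinimumCostToLabifyGTU; infer_instance

def pvWitness_findMinimumCostToLabifyGTU : Int × Int × (List (Int × List Int)) :=
  (3, 1, [(0, [1]), (1, [0]), (2, [])])

def Spec_findMinimumCostToLabifyGTU (x : Int) (y : Int) (graph : List (Int × List Int)) (out : Int) : Prop := out = findMinimumCostToLabifyGTU_alt x y graph
instance (x : Int) (y : Int) (graph : List (Int × List Int)) (out : Int) : Decidable (Spec_findMinimumCostToLabifyGTU x y graph out) := by unfold Spec_findMinimumCostToLabifyGTU; infer_instance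

-- ===== CLAIM (what is proved, stated in full; the proofs are below) =====
def Claim_equal_findMinimumCostToLabifyGTU : Prop := ∀ (x : Int) (y : Int) (graph : List (Int × List Int)), Dom_findMinimumCostToLabifyGTU x y graph → Pre_findMinimumCostToLabifyGTU x y graph → Spec_findMinimumCostToLabifyGTU x y graph (findMinimumCostToLabifyGTU x y graph)

-- ===== LEMMAS AND PROOFS =====
def pvEdge (graph : List (Int × List Int)) (a b : Int) : Prop := b ∈ pvAdj graph a
def pvReach (graph : List (Int × List Int)) (k v : Int) : Prop :=
  Relation.ReflTransGen (pvEdge graph) k v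
def pvCanon (s : List Int) : List Int := PySem.List.sorted s (fun v => v) false

-- ---- A-side characterisation: BFS collects exactly the reachable nodes ----
theorem pvBfsInner_mem (adj : List Int) : ∀ (iv : PySem.Dict Int Bool) (q : List Int),
    (∀ v, ((adj.foldl pvBfsStep (iv, q)).1.getD v false = true ↔
        (iv.getD v false = true ∨ v ∈ adj)))
    ∧ (∀ v, (v ∈ (adj.foldl pvBfsStep (iv, q)).2 ↔
        (v ∈ q ∨ (v ∈ adj ∧ ¬ iv.getD v false = true)))) := by
  induction adj with
  | nil => intro iv q; exact ⟨fun v => by simp, fun v => by simp⟩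
  | cons i t ih =>
    intro iv q
    simp only [List.foldl_cons]
    by_cases h : iv.getD i false = true
    · have hstep : pvBfsStep (iv, q) i = (iv, q) := by simp [pvBfsStep, h]
      rw [hstep]
      obtain ⟨ih1, ih2⟩ := ih iv q
      refine ⟨fun v => ?_, fun v => ?_⟩
      · rw [ih1 v, List.mem_cons]
        by_cases hv : v = i
        · subst hv; simp [h]
        · tauto
      · rw [ih2 v, List.mem_cons]
        by_cases hv : v = i
        · subst hv; simp [h]
        · tauto
    · have hstep : pvBfsStep (iv, q) i = (iv.insert i true, q ++ [i]) := by simp [pvBfsStep, h]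
      rw [hstep]
      obtain ⟨ih1, ih2⟩ := ih (iv.insert i true) (q ++ [i])
      refine ⟨fun v => ?_, fun v => ?_⟩
      · rw [ih1 v, PySem.Dict.getD_insert, List.mem_cons]
        by_cases hv : v = i
        · subst hv; simp
        · simp only [if_neg hv]; tauto
      · rw [ih2 v, PySem.Dict.getD_insert, List.mem_append, List.mem_cons]
        by_cases hv : v = i
        · subst hv; simp [h]
        · simp only [List.mem_cons, List.not_mem_nil, hv, if_false, or_false, false_or]

theorem pvBfsLoop_mem (graph : List (Int × List Int)) (k : Int) :
    ∀ (iv : PySem.Dict Int Bool) (queue order : List Int),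
    iv.getD k false = true →
    (∀ v, iv.getD v false = true ↔ (v ∈ order ∨ v ∈ queue)) →
    (∀ v, iv.getD v false = true → pvReach graph k v) →
    (∀ v ∈ order, ∀ w ∈ pvAdj graph v, iv.getD w false = true) →
    ∀ v, (v ∈ pvBfsLoop graph iv queue order ↔ pvReach graph k v) := by
  intro iv queue order
  induction iv, queue, order using pvBfsLoop.induct graph with
  | case1 iv order =>
    intro h0 h1 h2 h3 v
    rw [pvBfsLoop]
    constructor
    · intro hv
      exact h2 v ((h1 v).mpr (Or.inl hv))
    · intro hr
      induction hr with
      | refl =>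
        rcases (h1 k).mp h0 with h | h
        · exact h
        · simp at h
      | @tail b c hb hbc ihb =>
        rcases (h1 c).mp (h3 b ihb c hbc) with h | h
        · exact h
        · simp at h
  | case2 iv order start rest ih =>
    intro h0 h1 h2 h3
    obtain ⟨m1, m2⟩ := pvBfsInner_mem (pvAdj graph start) iv rest
    have hstartm : iv.getD start false = true := (h1 start).mpr (Or.inr (List.mem_cons_self ..))
    rw [pvBfsLoop]
    apply ih
    · exact (m1 k).mpr (Or.inl h0)
    · intro v
      rw [m1 v, m2 v, List.mem_append, List.mem_singleton]
      have h1v := h1 v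
      rw [List.mem_cons] at h1v
      by_cases hm : iv.getD v false = true <;> tauto
    · intro v hv
      rcases (m1 v).mp hv with h | h
      · exact h2 v h
      · exact Relation.ReflTransGen.tail (h2 start hstartm) h
    · intro v hv w hw
      rw [List.mem_append, List.mem_singleton] at hv
      rcases hv with hv | rfl
      · exact (m1 w).mpr (Or.inl (h3 v hv w hw))
      · exact (m1 w).mpr (Or.inr hw)

theorem pvInitFalse (v : Int) : ∀ (l : List (Int × List Int)) (d : PySem.Dict Int Bool),
    d.getD v false = false →
    (l.foldl (fun d p => d.insert p.1 false) d).getD v false = false := by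
  intro l
  induction l with
  | nil => intro d hd; exact hd
  | cons p t ih =>
    intro d hd
    simp only [List.foldl_cons]
    apply ih
    rw [PySem.Dict.getD_insert]
    split <;> simp [hd]

theorem pvBfs_mem (graph : List (Int × List Int)) (k v : Int) :
    v ∈ breadthFirstSearch k graph ↔ pvReach graph k v := by
  unfold breadthFirstSearch
  have hinit : ∀ w, ((((pvDict graph).items.foldl (fun d p => d.insert p.1 false)
      PySem.Dict.empty).insert k true).getD w false = true) ↔ w = k := by
    intro w
    rw [PySem.Dict.getD_insert]
    by_cases hw : w = k
    · simp [hw]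
    · simp only [if_neg hw]
      have := pvInitFalse w (pvDict graph).items PySem.Dict.empty (by simp [pysem])
      simp [this, hw]
  apply pvBfsLoop_mem graph k
  · exact (hinit k).mpr rfl
  · intro w
    rw [hinit w]
    simp
  · intro w hw
    rw [hinit w] at hw
    subst hw
    exact Relation.ReflTransGen.refl
  · intro w hw
    simp at hw

-- ---- B-side characterisation: n rounds of composition give exactly the reachable sets ----
theorem pvClosed (graph : List (Int × List Int))
    (h : ∀ p ∈ (PySem.Dict.ofList graph).items, ∀ w ∈ p.2, w ∈ (PySem.Dict.ofList graph).keys) :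
    ∀ k, ∀ w ∈ pvAdj graph k, w ∈ (pvDict graph).keys := by
  intro k w hw
  unfold pvAdj at hw
  rw [PySem.Dict.getD_eq_get?_getD] at hw
  cases hg : (pvDict graph).get? k with
  | none => rw [hg] at hw; cases hw
  | some l =>
    rw [hg] at hw
    simp only [Option.getD_some] at hw
    exact h (k, l) (PySem.Dict.mem_items_of_get?_eq_some _ hg) w hw

theorem pvBuild_items (ks : List Int) (hnd : ks.Nodup) (f : Int → PySem.Set Int) :
    (ks.foldl (fun d k => d.insert k (f k)) PySem.Dict.empty).items
      = ks.map (fun k => (k, f k)) := by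
  have h := PySem.Dict.items_foldl_insert_fresh ks (fun k => k) f PySem.Dict.empty
    (fun a _ => by simp [pysem]) (by simpa using hnd)
  simpa using h

theorem pvBuild_keys (ks : List Int) (hnd : ks.Nodup) (f : Int → PySem.Set Int) :
    (ks.foldl (fun d k => d.insert k (f k)) PySem.Dict.empty).keys = ks := by
  simp [PySem.Dict.keys, pvBuild_items ks hnd f, Function.comp_def]

theorem pvBuild_getD (ks : List Int) (hnd : ks.Nodup) (f : Int → PySem.Set Int)
    (k : Int) (hk : k ∈ ks) :
    (ks.foldl (fun d k => d.insert k (f k)) PySem.Dict.empty).getD k PySem.Set.empty = f k := by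
  apply PySem.Dict.getD_of_mem_items
  · rw [pvBuild_items ks hnd f]
    exact List.mem_map.mpr ⟨k, hk, rfl⟩
  · rw [pvBuild_keys ks hnd f]
    exact hnd

theorem pvBuild_values (ks : List Int) (hnd : ks.Nodup) (f : Int → PySem.Set Int) :
    (ks.foldl (fun d k => d.insert k (f k)) PySem.Dict.empty).values = ks.map f := by
  simp [PySem.Dict.values, pvBuild_items ks hnd f]

-- v is reachable from k along a walk of at most n edges
def pvKReach (graph : List (Int × List Int)) : Nat → Int → Int → Prop
  | 0, k, v => v = k
  | Nat.succ n, k, v => v = k ∨ ∃ w ∈ pvAdj graph k, pvKReach graph n w v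

theorem pvUnionFold (R : PySem.Dict Int (PySem.Set Int)) (adj : List Int) :
    ∀ s : PySem.Set Int, s.Nodup →
    (adj.foldl (fun s w => PySem.Set.update s (R.getD w PySem.Set.empty)) s).Nodup
    ∧ ∀ v, (v ∈ adj.foldl (fun s w => PySem.Set.update s (R.getD w PySem.Set.empty)) s
        ↔ v ∈ s ∨ ∃ w ∈ adj, v ∈ R.getD w PySem.Set.empty) := by
  induction adj with
  | nil => intro s hs; exact ⟨hs, fun v => by simp⟩
  | cons a t ih =>
    intro s hs
    simp only [List.foldl_cons]
    obtain ⟨nd', hmem⟩ := ih (PySem.Set.update s (R.getD a PySem.Set.empty))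
      (PySem.Set.nodup_update s _ hs)
    refine ⟨nd', fun v => ?_⟩
    rw [hmem v, PySem.Set.mem_update]
    constructor
    · rintro ((h | h) | ⟨w, hw, h⟩)
      · exact Or.inl h
      · exact Or.inr ⟨a, List.mem_cons_self .., h⟩
      · exact Or.inr ⟨w, List.mem_cons_of_mem _ hw, h⟩
    · rintro (h | ⟨w, hw, h⟩)
      · exact Or.inl (Or.inl h)
      · rcases List.mem_cons.mp hw with rfl | hw'
        · exact Or.inl (Or.inr h)
        · exact Or.inr ⟨w, hw', h⟩

theorem pvIter_spec (graph : List (Int × List Int))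
    (hcl : ∀ k, ∀ w ∈ pvAdj graph k, w ∈ (pvDict graph).keys) :
    ∀ (n : Nat) (k : Int), k ∈ (pvDict graph).keys →
    ((pvReachIter graph n).getD k PySem.Set.empty).Nodup
    ∧ ∀ v, (v ∈ (pvReachIter graph n).getD k PySem.Set.empty ↔ pvKReach graph n k v) := by
  have hnd : (pvDict graph).keys.Nodup := PySem.Dict.nodup_keys_ofList graph
  intro n
  induction n with
  | zero =>
    intro k hk
    have e : (pvReachIter graph 0).getD k PySem.Set.empty = PySem.Set.ofList [k] := by
      show (pvReachInit graph).getD k PySem.Set.empty = _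
      unfold pvReachInit
      exact pvBuild_getD _ hnd _ k hk
    rw [e]
    refine ⟨PySem.Set.nodup_ofList _, fun v => ?_⟩
    rw [PySem.Set.mem_ofList]
    show v ∈ [k] ↔ v = k
    simp
  | succ n ih =>
    intro k hk
    have e : (pvReachIter graph (n + 1)).getD k PySem.Set.empty
        = (pvAdj graph k).foldl
            (fun s w => PySem.Set.update s ((pvReachIter graph n).getD w PySem.Set.empty))
            (PySem.Set.ofList [k]) := by
      show (pvReachStep graph (pvReachIter graph n)).getD k PySem.Set.empty = _
      unfold pvReachStep
      exact pvBuild_getD _ hnd _ k hk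
    rw [e]
    obtain ⟨nd', hmem⟩ := pvUnionFold (pvReachIter graph n) (pvAdj graph k)
      (PySem.Set.ofList [k]) (PySem.Set.nodup_ofList _)
    refine ⟨nd', fun v => ?_⟩
    rw [hmem v, PySem.Set.mem_ofList]
    show v ∈ [k] ∨ _ ↔ (v = k ∨ ∃ w ∈ pvAdj graph k, pvKReach graph n w v)
    simp only [List.mem_singleton]
    constructor
    · rintro (h | ⟨w, hw, h⟩)
      · exact Or.inl h
      · exact Or.inr ⟨w, hw, ((ih w (hcl k w hw)).2 v).mp h⟩
    · rintro (h | ⟨w, hw, h⟩)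
      · exact Or.inl h
      · exact Or.inr ⟨w, hw, ((ih w (hcl k w hw)).2 v).mpr h⟩

-- ---- bounded walks coincide with reachability (pigeonhole on simple paths) ----
theorem pvKReach_succ (graph : List (Int × List Int)) :
    ∀ (n : Nat) (k v : Int), pvKReach graph n k v → pvKReach graph (n + 1) k v := by
  intro n
  induction n with
  | zero => intro k v h; exact Or.inl h
  | succ n ih =>
    rintro k v (h | ⟨w, hw, h⟩)
    · exact Or.inl h
    · exact Or.inr ⟨w, hw, ih w v h⟩

theorem pvKReach_mono (graph : List (Int × List Int)) {m n : Nat} (h : m ≤ n) (k v : Int)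
    (hk : pvKReach graph m k v) : pvKReach graph n k v := by
  induction n with
  | zero => cases Nat.le_zero.mp h; exact hk
  | succ n ih =>
    rcases Nat.lt_or_ge m (n + 1) with hlt | hge
    · exact pvKReach_succ graph n k v (ih (Nat.lt_succ_iff.mp hlt))
    · have : m = n + 1 := Nat.le_antisymm h hge
      exact this ▸ hk

theorem pvKReach_toReach (graph : List (Int × List Int)) :
    ∀ (n : Nat) (k v : Int), pvKReach graph n k v → pvReach graph k v := by
  intro n
  induction n with
  | zero => intro k v h; exact h ▸ Relation.ReflTransGen.refl
  | succ n ih =>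
    rintro k v (h | ⟨w, hw, h⟩)
    · exact h ▸ Relation.ReflTransGen.refl
    · exact Relation.ReflTransGen.head hw (ih w v h)

-- explicit walks: pvPath k l v means l is the list of nodes after k on a walk from k to v
def pvPath (graph : List (Int × List Int)) : Int → List Int → Int → Prop
  | k, [], v => v = k
  | k, w :: t, v => w ∈ pvAdj graph k ∧ pvPath graph w t v

theorem pvPath_snoc (graph : List (Int × List Int)) :
    ∀ (l : List Int) (k u w : Int), pvPath graph k l u → w ∈ pvAdj graph u →
    pvPath graph k (l ++ [w]) w := by
  intro l
  induction l with
  | nil =>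
    intro k u w h hw
    exact ⟨h ▸ hw, rfl⟩
  | cons a t ih =>
    intro k u w h hw
    exact ⟨h.1, ih a u w h.2 hw⟩

theorem pvReach_path (graph : List (Int × List Int)) (k v : Int) (h : pvReach graph k v) :
    ∃ l, pvPath graph k l v := by
  induction h with
  | refl => exact ⟨[], rfl⟩
  | @tail b c hb hbc ihb =>
    obtain ⟨l, hl⟩ := ihb
    exact ⟨l ++ [c], pvPath_snoc graph l k b c hl hbc⟩

theorem pvPath_cut (graph : List (Int × List Int)) :
    ∀ (l1 : List Int) (s k l2v : Int) (l2 : List Int),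
    pvPath graph s (l1 ++ k :: l2) l2v → pvPath graph k l2 l2v := by
  intro l1
  induction l1 with
  | nil => intro s k v l2 h; exact h.2
  | cons a t ih =>
    intro s k v l2 h
    exact ih a k v l2 h.2

theorem pvPath_shorten (graph : List (Int × List Int)) :
    ∀ (N : Nat) (l : List Int) (k v : Int), l.length ≤ N → pvPath graph k l v →
    ∃ l', l' ⊆ l ∧ (k :: l').Nodup ∧ pvPath graph k l' v := by
  intro N
  induction N with
  | zero =>
    intro l k v hlen h
    rw [List.length_eq_zero_iff.mp (Nat.le_zero.mp hlen)] at h ⊢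
    exact ⟨[], by simp, by simp, h⟩
  | succ N ih =>
    intro l k v hlen h
    by_cases hkl : k ∈ l
    · obtain ⟨l1, l2, rfl⟩ := List.append_of_mem hkl
      have h2 : pvPath graph k l2 v := pvPath_cut graph l1 k k v l2 h
      have hlen2 : l2.length ≤ N := by
        have := hlen
        simp only [List.length_append, List.length_cons] at this
        omega
      obtain ⟨l', hsub, hnd, hp⟩ := ih l2 k v hlen2 h2
      exact ⟨l', fun a ha => List.mem_append.mpr (Or.inr (List.mem_cons_of_mem _ (hsub ha))),
        hnd, hp⟩
    · cases l with
      | nil => exact ⟨[], by simp, by simp, h⟩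
      | cons w t =>
        obtain ⟨hw, hp⟩ := h
        have hlent : t.length ≤ N := by
          simp only [List.length_cons] at hlen; omega
        obtain ⟨t', hsub, hnd, hp'⟩ := ih t w v hlent hp
        refine ⟨w :: t', ?_, ?_, hw, hp'⟩
        · intro a ha
          rcases List.mem_cons.mp ha with rfl | ha'
          · exact List.mem_cons_self ..
          · exact List.mem_cons_of_mem _ (hsub ha')
        · rw [List.nodup_cons]
          refine ⟨?_, hnd⟩
          intro hk
          rcases List.mem_cons.mp hk with rfl | hk'
          · exact hkl (List.mem_cons_self ..)
          · exact hkl (List.mem_cons_of_mem _ (hsub hk'))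

theorem pvPath_keys (graph : List (Int × List Int))
    (hcl : ∀ k, ∀ w ∈ pvAdj graph k, w ∈ (pvDict graph).keys) :
    ∀ (l : List Int) (k v : Int), pvPath graph k l v → ∀ x ∈ l, x ∈ (pvDict graph).keys := by
  intro l
  induction l with
  | nil => intro k v _ x hx; cases hx
  | cons w t ih =>
    intro k v h x hx
    rcases List.mem_cons.mp hx with rfl | hx'
    · exact hcl k x h.1
    · exact ih w v h.2 x hx'

theorem pvPath_kreach (graph : List (Int × List Int)) :
    ∀ (l : List Int) (k v : Int), pvPath graph k l v → pvKReach graph l.length k v := by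
  intro l
  induction l with
  | nil => intro k v h; exact h
  | cons w t ih =>
    intro k v h
    exact Or.inr ⟨w, h.1, ih w v h.2⟩

theorem pvReach_iff_kreach (graph : List (Int × List Int))
    (hcl : ∀ k, ∀ w ∈ pvAdj graph k, w ∈ (pvDict graph).keys)
    (k : Int) (hk : k ∈ (pvDict graph).keys) (v : Int) :
    pvReach graph k v ↔ pvKReach graph (pvDict graph).size k v := by
  constructor
  · intro h
    obtain ⟨l, hl⟩ := pvReach_path graph k v h
    obtain ⟨l', hsub, hnd, hp⟩ := pvPath_shorten graph l.length l k v le_rfl hl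
    have hsubk : (k :: l') ⊆ (pvDict graph).keys := by
      intro a ha
      rcases List.mem_cons.mp ha with rfl | ha'
      · exact hk
      · exact pvPath_keys graph hcl l' k v hp a ha'
    have hlen : l'.length + 1 ≤ (pvDict graph).keys.length :=
      (List.subperm_of_subset hnd hsubk).length_le
    have hsize : (pvDict graph).keys.length = (pvDict graph).size := by
      simp [PySem.Dict.keys, PySem.Dict.size]
    exact pvKReach_mono graph (by omega) k v (pvPath_kreach graph l' k v hp)
  · exact pvKReach_toReach graph (pvDict graph).size k v

-- ---- canonical forms coincide ----
theorem pvCanon_eq_iff (s t : PySem.Set Int) (hs : s.Nodup) (ht : t.Nodup) :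
    (PySem.Set.equal s t = true ↔ pvCanon s = pvCanon t) := by
  rw [PySem.Set.equal_iff]
  unfold pvCanon
  rw [PySem.List.sorted_id_eq_sorted_id_iff_perm, List.perm_ext_iff_of_nodup hs ht]

theorem pvCanon_iter (graph : List (Int × List Int))
    (hcl : ∀ k, ∀ w ∈ pvAdj graph k, w ∈ (pvDict graph).keys)
    (k : Int) (hk : k ∈ (pvDict graph).keys) :
    PySem.List.sorted ((pvReachIter graph (pvDict graph).size).getD k PySem.Set.empty)
        (fun v => v) false
      = pvCanon (PySem.Set.ofList (breadthFirstSearch k graph)) := by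
  obtain ⟨hnd, hmem⟩ := pvIter_spec graph hcl (pvDict graph).size k hk
  unfold pvCanon
  rw [PySem.List.sorted_id_eq_sorted_id_iff_perm,
    List.perm_ext_iff_of_nodup hnd (PySem.Set.nodup_ofList _)]
  intro v
  rw [hmem v, PySem.Set.mem_ofList, pvBfs_mem, pvReach_iff_kreach graph hcl k hk v]

theorem pvDedup (rs : List (PySem.Set Int)) : ∀ (temp : List (PySem.Set Int)),
    (∀ t ∈ temp, t.Nodup) → (∀ r ∈ rs, r.Nodup) →
    rs.foldl (fun c r => PySem.Set.add c (pvCanon r)) (temp.map pvCanon)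
      = (pvCheckUnique rs temp).map pvCanon := by
  induction rs with
  | nil => intro temp _ _; rfl
  | cons r rest ih =>
    intro temp ht hr
    have hrnd : r.Nodup := hr r (List.mem_cons_self ..)
    have hrest : ∀ x ∈ rest, x.Nodup := fun x hx => hr x (List.mem_cons_of_mem _ hx)
    unfold pvCheckUnique
    simp only [List.foldl_cons]
    have hmem : (pvCanon r ∈ temp.map pvCanon) ↔
        (temp.any (fun t => PySem.Set.equal t r)) = true := by
      rw [List.mem_map, List.any_eq_true]
      constructor
      · rintro ⟨t, htm, hc⟩
        exact ⟨t, htm, (pvCanon_eq_iff t r (ht t htm) hrnd).mpr hc⟩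
      · rintro ⟨t, htm, he⟩
        exact ⟨t, htm, (pvCanon_eq_iff t r (ht t htm) hrnd).mp he⟩
    by_cases hin : (temp.any (fun t => PySem.Set.equal t r)) = true
    · rw [PySem.Set.add_eq_ite, if_pos (hmem.mpr hin), if_pos hin]
      exact ih temp ht hrest
    · rw [PySem.Set.add_eq_ite, if_neg (fun hc => hin (hmem.mp hc)),
        if_neg (by simpa using hin)]
      have : temp.map pvCanon ++ [pvCanon r] = (temp ++ [r]).map pvCanon := by
        simp
      rw [this]
      exact ih (temp ++ [r])
        (fun x hx => by
          rcases List.mem_append.mp hx with hx | hx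
          · exact ht x hx
          · rw [List.mem_singleton] at hx; subst hx; exact hrnd)
        hrest

theorem pvCanon_length (u : List Int) : (pvCanon u).length = u.length :=
  (PySem.List.sorted_perm u (fun v => v) false).length_eq

-- ===== VERDICT (by name: the statement is the Claim_ definition above) =====
theorem findMinimumCostToLabifyGTU_spec : Claim_equal_findMinimumCostToLabifyGTU := by
  intro x y graph _hdom hpre
  unfold Spec_findMinimumCostToLabifyGTU findMinimumCostToLabifyGTU findMinimumCostToLabifyGTU_alt
  by_cases hxy : x ≤ y
  · rw [if_pos hxy, if_pos hxy]
  · have hcl : ∀ k, ∀ w ∈ pvAdj graph k, w ∈ (pvDict graph).keys := by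
      apply pvClosed
      rcases hpre with h | h
      · exact absurd h hxy
      · exact h
    have hknd : (pvDict graph).keys.Nodup := PySem.Dict.nodup_keys_ofList graph
    rw [if_neg hxy, if_neg hxy]
    unfold howManyConnected
    simp only []
    rw [PySem.List.foldl_append_singleton_eq_map
      (f := fun p : Int × List Int => PySem.Set.ofList (breadthFirstSearch p.1 graph)),
      List.nil_append]
    -- rewrite B's fold over reach.values into A's canonical-component fold
    have hvals : (pvReachIter graph (pvDict graph).size).values
        = (pvDict graph).keys.map
          (fun k => (pvReachIter graph (pvDict graph).size).getD k PySem.Set.empty) := by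
      cases hsz : (pvDict graph).size with
      | zero =>
        show (pvReachInit graph).values = _
        unfold pvReachInit
        rw [pvBuild_values _ hknd]
        apply List.map_congr_left
        intro k hk
        have e : (pvReachIter graph 0).getD k PySem.Set.empty = PySem.Set.ofList [k] := by
          show (pvReachInit graph).getD k PySem.Set.empty = _
          unfold pvReachInit
          exact pvBuild_getD _ hknd _ k hk
        rw [e]
      | succ n =>
        show (pvReachStep graph (pvReachIter graph n)).values = _
        unfold pvReachStep
        rw [pvBuild_values _ hknd]
        apply List.map_congr_left
        intro k hk
        have e : (pvReachIter graph (n + 1)).getD k PySem.Set.empty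
            = (pvAdj graph k).foldl
                (fun s w => PySem.Set.update s ((pvReachIter graph n).getD w PySem.Set.empty))
                (PySem.Set.ofList [k]) := by
          show (pvReachStep graph (pvReachIter graph n)).getD k PySem.Set.empty = _
          unfold pvReachStep
          exact pvBuild_getD _ hknd _ k hk
        rw [e]
    rw [hvals, List.foldl_map]
    rw [PySem.List.foldl_congr_mem _ _
      (fun (c : PySem.Set (List Int)) (k : Int) =>
        PySem.Set.add c (pvCanon (PySem.Set.ofList (breadthFirstSearch k graph))))
      PySem.Set.empty
      (fun c k hk => by rw [pvCanon_iter graph hcl k hk])]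
    have hkeys : (pvDict graph).keys = (pvDict graph).items.map (·.1) := rfl
    rw [hkeys, List.foldl_map]
    have hcomps : (pvDict graph).items.foldl
        (fun (c : PySem.Set (List Int)) (p : Int × List Int) =>
          PySem.Set.add c (pvCanon (PySem.Set.ofList (breadthFirstSearch p.1 graph))))
        PySem.Set.empty
        = (pvCheckUnique ((pvDict graph).items.map
            (fun p => PySem.Set.ofList (breadthFirstSearch p.1 graph))) []).map pvCanon := by
      rw [← pvDedup _ [] (by simp)
        (by
          intro r hr
          rw [List.mem_map] at hr
          obtain ⟨p, _, rfl⟩ := hr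
          exact PySem.Set.nodup_ofList _)]
      rw [List.foldl_map]
      rfl
    rw [hcomps]
    set U := pvCheckUnique ((pvDict graph).items.map
      (fun p => PySem.Set.ofList (breadthFirstSearch p.1 graph))) [] with hUdef
    rw [PySem.List.foldl_add (g := fun i => PySem.Set.len i - 1)]
    have hlenmap : (U.map pvCanon).map (fun c => (c.length : Int)) = U.map (fun u => (u.length : Int)) := by
      rw [List.map_map]
      apply List.map_congr_left
      intro u _
      simp [Function.comp, pvCanon_length]
    have hsetlen : U.map (fun i => PySem.Set.len i - 1) = U.map (fun i => (i.length : Int) + (-1)) := by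
      apply List.map_congr_left
      intro u _
      simp [PySem.Set.len, sub_eq_add_neg]
    rw [hlenmap, hsetlen, PySem.List.sum_map_add_int, PySem.List.sum_map_const_int,
      List.length_map]
    ring
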